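-- pv_equiv track=rewrite | github.com/m10ust/metaformers | scripts/metaformers_the_right_one.py | parse_mediator
-- ===== SOURCE A (Python) =====
-- from typing import Tuple, Optional
--
-- def parse_mediator(txt: str) -> Tuple[Optional[str], Optional[str]]:
--     meta, rev = None, None
--     for ln in txt.splitlines():
--         s = ln.strip()
--         if s.lower().startswith("meta:"):
--             meta = s[5:].strip()
--         elif s.lower().startswith("revised:"):
--             rev = s[8:].strip()
--     return meta, rev
-- ===== SOURCE B (Python) =====
-- def parse_mediator(txt):
--     meta, rev = None, None
--     for ln in reversed(txt.splitlines()):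
--         if meta is not None and rev is not None:
--             break
--         s = ln.strip()
--         if meta is None and s.lower().startswith("meta:"):
--             meta = s[5:].strip()
--         elif rev is None and s.lower().startswith("revised:"):
--             rev = s[8:].strip()
--     return meta, rev
-- ===== Notes on version B (the rewrite author's own statement) =====
-- stated objective: alternative
-- what changed: B scans the lines in reverse, keeping the first backward match for each field (= the last forward occurrence) and breaking out as soon as both are found, instead of A's forward pass that overwrites the fields on every match.
import Mathlib
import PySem

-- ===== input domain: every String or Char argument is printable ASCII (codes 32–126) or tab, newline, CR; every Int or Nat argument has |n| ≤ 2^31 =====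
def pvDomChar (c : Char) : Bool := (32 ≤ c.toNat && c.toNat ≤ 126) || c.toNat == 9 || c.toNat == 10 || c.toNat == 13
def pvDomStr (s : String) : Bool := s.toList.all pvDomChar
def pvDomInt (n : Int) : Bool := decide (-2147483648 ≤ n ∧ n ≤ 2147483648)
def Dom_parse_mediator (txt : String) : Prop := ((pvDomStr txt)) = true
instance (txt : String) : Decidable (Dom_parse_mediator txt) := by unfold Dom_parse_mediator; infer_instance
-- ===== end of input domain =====

-- B scans the lines in reverse with an early break once both fields are found,
-- instead of A's forward overwrite-on-every-match pass (alternative decomposition, same result).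

-- ===== PORT A =====
def parse_mediator (txt : String) : Option String × Option String :=
  (PySem.Str.splitlines txt).foldl
    (fun (st : Option String × Option String) ln =>
      let s := PySem.Str.strip ln
      if PySem.Str.startswith (PySem.Str.lower s) "meta:" then
        (some (PySem.Str.strip (PySem.Str.slice s (some 5) none)), st.2)
      else if PySem.Str.startswith (PySem.Str.lower s) "revised:" then
        (st.1, some (PySem.Str.strip (PySem.Str.slice s (some 8) none)))
      else st)
    (none, none)

-- ===== PORT B =====
-- B's reversed loop with break: stop as soon as both fields are assigned.
def pmLoopB : List String → Option String → Option String → Option String × Option String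
  | [], mt, rv => (mt, rv)
  | ln :: rest, mt, rv =>
    if mt.isSome && rv.isSome then (mt, rv)
    else
      let s := PySem.Str.strip ln
      if mt.isNone && PySem.Str.startswith (PySem.Str.lower s) "meta:" then
        pmLoopB rest (some (PySem.Str.strip (PySem.Str.slice s (some 5) none))) rv
      else if rv.isNone && PySem.Str.startswith (PySem.Str.lower s) "revised:" then
        pmLoopB rest mt (some (PySem.Str.strip (PySem.Str.slice s (some 8) none)))
      else
        pmLoopB rest mt rv

def parse_mediator_alt (txt : String) : Option String × Option String :=
  pmLoopB (PySem.Str.splitlines txt).reverse none none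

-- ===== PRECONDITION & SPEC =====
def Spec_parse_mediator (txt : String) (out : Option String × Option String) : Prop := out = parse_mediator_alt txt
instance (txt : String) (out : Option String × Option String) : Decidable (Spec_parse_mediator txt out) := by unfold Spec_parse_mediator; infer_instance

-- ===== CLAIM (what is proved, stated in full; the proofs are below) =====
def Claim_equal_parse_mediator : Prop := ∀ (txt : String), Dom_parse_mediator txt → Spec_parse_mediator txt (parse_mediator txt)

-- ===== LEMMAS AND PROOFS =====

def pmIsMeta (ln : String) : Bool :=
  PySem.Str.startswith (PySem.Str.lower (PySem.Str.strip ln)) "meta:"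

def pmIsRev (ln : String) : Bool :=
  PySem.Str.startswith (PySem.Str.lower (PySem.Str.strip ln)) "revised:"

def pmMetaVal (ln : String) : String :=
  PySem.Str.strip (PySem.Str.slice (PySem.Str.strip ln) (some 5) none)

def pmRevVal (ln : String) : String :=
  PySem.Str.strip (PySem.Str.slice (PySem.Str.strip ln) (some 8) none)

def pmFM (ls : List String) : Option String :=
  ls.findSome? (fun ln => if pmIsMeta ln then some (pmMetaVal ln) else none)

def pmFR (ls : List String) : Option String :=
  ls.findSome? (fun ln => if pmIsRev ln then some (pmRevVal ln) else none)

-- a line cannot start with both "meta:" and "revised:" (first characters differ)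
lemma pmIsMeta_not_isRev (ln : String) (h : pmIsMeta ln = true) : pmIsRev ln = false := by
  by_contra hc
  rw [Bool.not_eq_false] at hc
  unfold pmIsMeta at h
  unfold pmIsRev at hc
  rw [PySem.Str.startswith_eq, PySem.Chars.startswith_iff] at h hc
  obtain ⟨t1, h1⟩ := h
  obtain ⟨t2, h2⟩ := hc
  rw [← h1] at h2
  simp [show ("meta:".toList) = ['m','e','t','a',':'] from by decide,
        show ("revised:".toList) = ['r','e','v','i','s','e','d',':'] from by decide] at h2

-- definitional unfoldings expressed through pmIsMeta/pmIsRev/pmMetaVal/pmRevVal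
lemma stepA_eq (st : Option String × Option String) (l : String) :
    (fun (st : Option String × Option String) ln =>
      let s := PySem.Str.strip ln
      if PySem.Str.startswith (PySem.Str.lower s) "meta:" then
        (some (PySem.Str.strip (PySem.Str.slice s (some 5) none)), st.2)
      else if PySem.Str.startswith (PySem.Str.lower s) "revised:" then
        (st.1, some (PySem.Str.strip (PySem.Str.slice s (some 8) none)))
      else st) st l
    = if pmIsMeta l then (some (pmMetaVal l), st.2)
      else if pmIsRev l then (st.1, some (pmRevVal l))
      else st := rfl

lemma pmLoopB_cons (l : String) (ls : List String) (mt rv : Option String) :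
    pmLoopB (l :: ls) mt rv =
      if mt.isSome && rv.isSome then (mt, rv)
      else if mt.isNone && pmIsMeta l then pmLoopB ls (some (pmMetaVal l)) rv
      else if rv.isNone && pmIsRev l then pmLoopB ls mt (some (pmRevVal l))
      else pmLoopB ls mt rv := rfl

-- A's fold, with the state generalized: last match forward = first match backward
lemma foldA_eq (ls : List String) (m r : Option String) :
    ls.foldl
      (fun (st : Option String × Option String) ln =>
        let s := PySem.Str.strip ln
        if PySem.Str.startswith (PySem.Str.lower s) "meta:" then
          (some (PySem.Str.strip (PySem.Str.slice s (some 5) none)), st.2)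
        else if PySem.Str.startswith (PySem.Str.lower s) "revised:" then
          (st.1, some (PySem.Str.strip (PySem.Str.slice s (some 8) none)))
        else st)
      (m, r)
    = ((pmFM ls.reverse).or m, (pmFR ls.reverse).or r) := by
  induction ls generalizing m r with
  | nil => simp [pmFM, pmFR]
  | cons l ls ih =>
    simp only [stepA_eq] at ih
    simp only [List.foldl_cons, stepA_eq, List.reverse_cons, pmFM, pmFR,
      List.findSome?_append]
    simp only [pmFM, pmFR] at ih
    by_cases hm : pmIsMeta l
    · have hr := pmIsMeta_not_isRev l hm
      simp [hm, hr, ih]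
    · by_cases hr : pmIsRev l
      · simp [hm, hr, ih]
      · simp [hm, hr, ih]

-- B's loop computes the first match for each still-unset field
lemma pmLoopB_eq (ls : List String) (m r : Option String) :
    pmLoopB ls m r = (m.or (pmFM ls), r.or (pmFR ls)) := by
  induction ls generalizing m r with
  | nil => simp [pmLoopB, pmFM, pmFR]
  | cons l ls ih =>
    rw [pmLoopB_cons]
    cases m with
    | some a =>
      cases r with
      | some b => simp
      | none =>
        by_cases hr : pmIsRev l
        · have hm : pmIsMeta l = false := by
            by_contra hc
            rw [Bool.not_eq_false] at hc
            rw [pmIsMeta_not_isRev l hc] at hr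
            exact absurd hr (by simp)
          simp [hm, hr, ih, pmFM, pmFR]
        · simp [hr, ih, pmFM, pmFR]
    | none =>
      by_cases hm : pmIsMeta l
      · have hr := pmIsMeta_not_isRev l hm
        simp [hm, hr, ih, pmFM, pmFR]
      · by_cases hr : pmIsRev l
        · cases r with
          | some b => simp [hm, hr, ih, pmFM, pmFR]
          | none => simp [hm, hr, ih, pmFM, pmFR]
        · simp [hm, hr, ih, pmFM, pmFR]

-- ===== VERDICT (by name: the statement is the Claim_ definition above) =====
theorem parse_mediator_spec : Claim_equal_parse_mediator := by
  intro txt _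
  show parse_mediator txt = parse_mediator_alt txt
  rw [parse_mediator, parse_mediator_alt, foldA_eq, pmLoopB_eq]
  simp
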